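-- pv_equiv track=rewrite | github.com/JanickiJ/ASD | zGraphs/DFS.py | DFS
-- ===== SOURCE A (Python) =====
-- def DFSVisit(G,parent, visited, u):
--     visited[u] = True
--     for v in range(len(G)):
--         if G[u][v] == 1 and visited[v] is False:
--             parent[v]=u
--             DFSVisit(G, parent, visited, v)
--
-- def DFS(G):
--     n = len(G)
--     parent=[None]*n
--     visited = [False] * n
--     for u in range(n):
--         if visited[u] is False:
--             DFSVisit(G,parent, visited ,u)
--
--     return parent
-- ===== SOURCE B (Python) =====
-- def DFS(G):
--     n = len(G)
--     parent = [None] * n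
--     visited = [False] * n
--     for u in range(n):
--         if not visited[u]:
--             visited[u] = True
--             stack = [(u, 0)]
--             while stack:
--                 x, i = stack.pop()
--                 v = i
--                 while v < n and not (G[x][v] == 1 and not visited[v]):
--                     v += 1
--                 if v < n:
--                     parent[v] = x
--                     visited[v] = True
--                     stack.append((x, v + 1))
--                     stack.append((v, 0))
--     return parent
-- ===== Notes on version B (the rewrite author's own statement) =====
-- stated objective: alternative
-- what changed: Replaces the recursive DFSVisit helper with an explicit-stack iterative DFS inside the outer loop: a stack of (node, resume-index) frames, marking nodes visited on push, scanning each frame from its resume index for the next undiscovered neighbour.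
import Mathlib
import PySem

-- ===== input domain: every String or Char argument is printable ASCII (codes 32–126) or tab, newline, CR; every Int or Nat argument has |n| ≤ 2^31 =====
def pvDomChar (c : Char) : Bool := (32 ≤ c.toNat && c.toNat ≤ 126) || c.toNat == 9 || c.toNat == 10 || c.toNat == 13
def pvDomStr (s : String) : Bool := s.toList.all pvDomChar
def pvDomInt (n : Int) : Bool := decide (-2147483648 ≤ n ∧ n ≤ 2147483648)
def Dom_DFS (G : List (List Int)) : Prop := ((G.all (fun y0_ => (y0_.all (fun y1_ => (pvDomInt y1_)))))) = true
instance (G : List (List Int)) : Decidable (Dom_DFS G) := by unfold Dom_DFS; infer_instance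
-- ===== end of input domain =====

-- B replaces A's recursive DFSVisit by an explicit-stack iterative DFS (alternative decomposition,
-- same asymptotic cost); return values agree on all square matrices (Pre_).

-- state: (parent, visited)
-- `G[u][v] == 1 and visited[v] is False`; getD defaults never fire under Pre_ (rows long enough,
-- visited has length n and v < n).
def pvHit (G : List (List Int)) (vis : List Bool) (u v : Nat) : Bool :=
  ((G.getD u []).getD v 0 == 1) && (vis.getD v true == false)

-- ===== PORT A =====
-- A's DFSVisit: mark u, then loop v over range(n) recursing on hits.  The recursion is given
-- fuel (one unit per nested DFSVisit call); DFS passes fuel n+1, which never runs out since the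
-- nesting depth is bounded by the number of unvisited nodes (proved via the lemmas below).
mutual
def pvVisitA (G : List (List Int)) :
    Nat → List (Option Int) × List Bool → Nat → List (Option Int) × List Bool
  | 0, s, _ => s
  | f+1, s, u => pvLoopA G f (s.1, s.2.set u true) u 0
termination_by f s u => (f, 0)

def pvLoopA (G : List (List Int)) (f : Nat) (s : List (Option Int) × List Bool)
    (u v : Nat) : List (Option Int) × List Bool :=
  if h : v < G.length then
    if pvHit G s.2 u v then
      pvLoopA G f (pvVisitA G f (s.1.set v (some (u : Int)), s.2) v) u (v+1)
    else
      pvLoopA G f s u (v+1)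
  else s
termination_by (f, G.length - v + 1)
decreasing_by all_goals (simp_wf; omega)
end

def DFS (G : List (List Int)) : List (Option Int) :=
  ((List.range G.length).foldl
    (fun s u => if s.2.getD u true == false then pvVisitA G (G.length + 1) s u else s)
    (List.replicate G.length none, List.replicate G.length false)).1

-- ===== PORT B =====
-- first v ≥ i with G[u][v] == 1 and v unvisited (Source B's inner scanning while-loop)
def pvFind (G : List (List Int)) (vis : List Bool) (u i : Nat) : Option Nat :=
  if h : i < G.length then
    if pvHit G vis u i then some i else pvFind G vis u (i+1)
  else none
termination_by G.length - i

theorem pvFind_unvisited {G : List (List Int)} {vis : List Bool} {u i v : Nat}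
    (h : pvFind G vis u i = some v) : vis.getD v true = false := by
  fun_induction pvFind G vis u i with
  | case1 i hi hhit => simp only [Option.some.injEq] at h; subst h; simp [pvHit] at hhit; exact hhit.2
  | case2 i hi hhit ih => exact ih h
  | case3 => simp at h

theorem pvCount_set {vis : List Bool} {v : Nat}
    (h : vis.getD v true = false) :
    (vis.set v true).count false + 1 = vis.count false := by
  induction vis generalizing v with
  | nil => simp at h
  | cons b t ih =>
    cases v with
    | zero => subst h; simp
    | succ w => simp only [List.set_cons_succ, List.count_cons]
                have := ih (v := w) (by simpa using h)
                omega

-- the stack machine of Source B's while-loop; each push marks a freshly discovered node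
def pvRunB (G : List (List Int)) :
    List (Option Int) × List Bool → List (Nat × Nat) → List (Option Int) × List Bool
  | s, [] => s
  | s, (u, i) :: rest =>
    match hf : pvFind G s.2 u i with
    | some v => pvRunB G (s.1.set v (some (u : Int)), s.2.set v true)
                         ((v, 0) :: (u, v+1) :: rest)
    | none => pvRunB G s rest
termination_by s st => (s.2.count false, st.length)
decreasing_by
  · have := pvCount_set (pvFind_unvisited hf)
    simp_wf
    omega
  · simp_wf
    omega

def DFS_alt (G : List (List Int)) : List (Option Int) :=
  ((List.range G.length).foldl
    (fun s u => if s.2.getD u true == false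
                then pvRunB G (s.1, s.2.set u true) [(u, 0)] else s)
    (List.replicate G.length none, List.replicate G.length false)).1

-- ===== PRECONDITION & SPEC =====
-- Pre_ excludes exactly the inputs where Python A raises IndexError: some row shorter than n
-- (A reads G[u][v] for every u, v in range(n)).
def Pre_DFS (G : List (List Int)) : Prop := ∀ row ∈ G, G.length ≤ row.length
instance (G : List (List Int)) : Decidable (Pre_DFS G) := by unfold Pre_DFS; infer_instance
def pvWitness_DFS : List (List Int) := [[0, 1], [1, 0]]

def Spec_DFS (G : List (List Int)) (out : List (Option Int)) : Prop := out = DFS_alt G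
instance (G : List (List Int)) (out : List (Option Int)) : Decidable (Spec_DFS G out) := by unfold Spec_DFS; infer_instance

-- ===== CLAIM (what is proved, stated in full; the proofs are below) =====
def Claim_equal_DFS : Prop := ∀ (G : List (List Int)), Dom_DFS G → Pre_DFS G → Spec_DFS G (DFS G)

-- ===== LEMMAS AND PROOFS =====

-- setting an entry to true never increases the number of false entries
theorem pvCount_set_le (vis : List Bool) (v : Nat) :
    (vis.set v true).count false ≤ vis.count false := by
  induction vis generalizing v with
  | nil => simp
  | cons b t ih =>
    cases v with
    | zero => cases b <;> simp
    | succ w => simp only [List.set_cons_succ, List.count_cons]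
                have := ih w
                omega

-- A's traversal only sets visited flags: the false-count never grows and the length is kept
mutual
theorem pvVisitA_mono (G : List (List Int)) (f : Nat)
    (s : List (Option Int) × List Bool) (u : Nat) :
    (pvVisitA G f s u).2.count false ≤ s.2.count false ∧
      (pvVisitA G f s u).2.length = s.2.length := by
  cases f with
  | zero => simp [pvVisitA]
  | succ g =>
    rw [pvVisitA]
    have h := pvLoopA_mono G g (s.1, s.2.set u true) u 0
    have h2 := pvCount_set_le s.2 u
    simp only [List.length_set] at h
    exact ⟨le_trans h.1 h2, h.2⟩
termination_by (f, 0)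

theorem pvLoopA_mono (G : List (List Int)) (f : Nat)
    (s : List (Option Int) × List Bool) (u v : Nat) :
    (pvLoopA G f s u v).2.count false ≤ s.2.count false ∧
      (pvLoopA G f s u v).2.length = s.2.length := by
  rw [pvLoopA]
  split
  · split
    · have h1 := pvVisitA_mono G f (s.1.set v (some (u : Int)), s.2) v
      have h2 := pvLoopA_mono G f (pvVisitA G f (s.1.set v (some (u : Int)), s.2) v) u (v+1)
      exact ⟨le_trans h2.1 h1.1, h2.2.trans h1.2⟩
    · exact pvLoopA_mono G f s u (v+1)
  · simp
termination_by (f, G.length - v + 1)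
decreasing_by all_goals (simp_wf; omega)
end

-- if the scan finds no hit from v on, A's loop is a no-op
theorem pvLoopA_none (G : List (List Int)) (f : Nat)
    (s : List (Option Int) × List Bool) (u v : Nat)
    (h : pvFind G s.2 u v = none) : pvLoopA G f s u v = s := by
  fun_induction pvFind G s.2 u v with
  | case1 i hi hhit => simp at h
  | case2 i hi hhit ih =>
    rw [pvLoopA, dif_pos hi, if_neg hhit]
    exact ih h
  | case3 i hi => rw [pvLoopA, dif_neg hi]

-- if the scan first hits at w, A's loop skips straight to the recursive visit of w
theorem pvLoopA_found (G : List (List Int)) (f : Nat)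
    (s : List (Option Int) × List Bool) (u v w : Nat)
    (h : pvFind G s.2 u v = some w) :
    pvLoopA G f s u v
      = pvLoopA G f (pvVisitA G f (s.1.set w (some (u : Int)), s.2) w) u (w+1) := by
  fun_induction pvFind G s.2 u v with
  | case1 i hi hhit =>
    injection h with h
    subst h
    conv_lhs => rw [pvLoopA]
    rw [dif_pos hi, if_pos hhit]
  | case2 i hi hhit ih =>
    conv_lhs => rw [pvLoopA]
    rw [dif_pos hi, if_neg hhit]
    exact ih h
  | case3 i hi => cases h

-- unfolding lemmas for B's machine
theorem pvRunB_nil (G : List (List Int)) (s : List (Option Int) × List Bool) :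
    pvRunB G s [] = s := by
  rw [pvRunB]

theorem pvRunB_some (G : List (List Int)) (s : List (Option Int) × List Bool)
    (u i v : Nat) (rest : List (Nat × Nat)) (h : pvFind G s.2 u i = some v) :
    pvRunB G s ((u, i) :: rest)
      = pvRunB G (s.1.set v (some (u : Int)), s.2.set v true) ((v, 0) :: (u, v+1) :: rest) := by
  rw [pvRunB]
  split
  · next v' hv' => rw [h] at hv'; injection hv' with hv'; subst hv'; rfl
  · next hn => rw [h] at hn; cases hn

theorem pvRunB_none (G : List (List Int)) (s : List (Option Int) × List Bool)
    (u i : Nat) (rest : List (Nat × Nat)) (h : pvFind G s.2 u i = none) :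
    pvRunB G s ((u, i) :: rest) = pvRunB G s rest := by
  rw [pvRunB]
  split
  · next v' hv' => rw [h] at hv'; cases hv'
  · rfl

-- MAIN SIMULATION LEMMA: one stack frame (u, v) of B's machine computes exactly A's inner
-- loop from index v, provided A's fuel covers the number of still-unvisited nodes
theorem pvMain (G : List (List Int)) (k : Nat) :
    ∀ (s : List (Option Int) × List Bool) (u v : Nat) (rest : List (Nat × Nat)) (f : Nat),
      s.2.count false = k → k ≤ f →
      pvRunB G s ((u, v) :: rest) = pvRunB G (pvLoopA G f s u v) rest := by
  induction k using Nat.strong_induction_on with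
  | _ k ih =>
    intro s u v rest f hk hf
    cases hfind : pvFind G s.2 u v with
    | none =>
      rw [pvLoopA_none G f s u v hfind, pvRunB_none G s u v rest hfind]
    | some w =>
      have hvw := pvFind_unvisited hfind
      have hcnt := pvCount_set hvw
      cases f with
      | zero => omega
      | succ g =>
        rw [pvLoopA_found G (g+1) s u v w hfind]
        rw [pvVisitA]
        rw [pvRunB_some G s u v w rest hfind]
        have step1 := ih (k-1) (by omega)
          (s.1.set w (some (u : Int)), s.2.set w true) w 0 ((u, w+1) :: rest) g
          (by simp; omega) (by omega)
        rw [step1]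
        have hmono := pvLoopA_mono G g (s.1.set w (some (u : Int)), s.2.set w true) w 0
        simp only [List.length_set] at hmono
        exact ih ((pvLoopA G g (s.1.set w (some (u : Int)), s.2.set w true) w 0).2.count false)
          (by omega)
          (pvLoopA G g (s.1.set w (some (u : Int)), s.2.set w true) w 0) u (w+1) rest (g+1)
          rfl (by omega)

-- one step of the outer loop: launching A's recursive visit = launching B's stack traversal
theorem pvStep_eq (G : List (List Int)) (s : List (Option Int) × List Bool) (u : Nat)
    (hlen : s.2.length = G.length) :
    (if s.2.getD u true == false then pvVisitA G (G.length + 1) s u else s)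
      = (if s.2.getD u true == false then pvRunB G (s.1, s.2.set u true) [(u, 0)] else s) := by
  split
  · next hvis =>
    rw [pvVisitA]
    have hcnt : (s.2.set u true).count false ≤ G.length := by
      have := List.count_le_length (l := s.2.set u true) (a := false)
      simp [hlen] at this
      exact this
    rw [pvMain G ((s.2.set u true).count false)
          (s.1, s.2.set u true) u 0 [] G.length rfl hcnt]
    rw [pvRunB_nil]
  · rfl

-- the whole outer fold
theorem pvFold_eq (G : List (List Int)) (l : List Nat) :
    ∀ (s : List (Option Int) × List Bool), s.2.length = G.length →
    l.foldl (fun s u => if s.2.getD u true == false then pvVisitA G (G.length + 1) s u else s) s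
      = l.foldl (fun s u => if s.2.getD u true == false
                            then pvRunB G (s.1, s.2.set u true) [(u, 0)] else s) s := by
  induction l with
  | nil => intro s _; rfl
  | cons a l ihl =>
    intro s hlen
    simp only [List.foldl_cons]
    rw [← pvStep_eq G s a hlen]
    apply ihl
    split
    · next hvis =>
      rw [pvVisitA]
      have h := pvLoopA_mono G G.length (s.1, s.2.set a true) a 0
      simp only [List.length_set] at h
      rw [h.2]
      exact hlen
    · exact hlen

-- ===== VERDICT (by name: the statement is the Claim_ definition above) =====
theorem DFS_spec : Claim_equal_DFS := by
  intro G _ _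
  unfold Spec_DFS DFS DFS_alt
  exact congrArg Prod.fst (pvFold_eq G (List.range G.length)
    (List.replicate G.length none, List.replicate G.length false) (by simp))
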